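-- pv_equiv track=rewrite | github.com/lumiotools/promenade-industry-research | services/final.py | split_glossary_content
-- ===== SOURCE A (Python) =====
-- def split_glossary_content(content: str) -> list:
--     """
--     Splits glossary content into multiple slides.
--     Each letter group will be on its own slide.
--     """
--     slides = []
--
--     # Handle empty or error content
--     if not content or content == "# Glossary\n\nNo technical terms found in the presentation.":
--         return [content]
--
--     # Split by letter sections
--     letter_sections = content.split('\n\n**')[1:]  # Skip the header
--     current_slide = []
--     current_length = 0
--
--     for section in letter_sections:
--         section_content = f"**{section}"
--         lines = len(section_content.split('\n'))
--
--         if current_length + lines > 10 or not current_slide:  # Max 10 lines per slide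
--             if current_slide:
--                 slides.append("# Glossary\n\n" + "\n\n".join(current_slide))
--             current_slide = [section_content]
--             current_length = lines
--         else:
--             current_slide.append(section_content)
--             current_length += lines
--
--     if current_slide:
--         slides.append("# Glossary\n\n" + "\n\n".join(current_slide))
--
--     return slides if slides else ["# Glossary\n\nNo terms to display"]
-- ===== SOURCE B (Python) =====
-- def split_glossary_content(content: str) -> list:
--     """Same result as A via a different decomposition: size all sections up
--     front, then find each slide's group boundary with a nested index scan
--     (two-pointer style) and slice the group out, instead of A's single fold
--     threading slides/current_slide/current_length accumulators."""
--     if not content or content == "# Glossary\n\nNo technical terms found in the presentation.":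
--         return [content]
--     sections = ['**' + s for s in content.split('\n\n**')[1:]]
--     sizes = [len(t.split('\n')) for t in sections]
--     slides = []
--     i = 0
--     while i < len(sections):
--         j = i + 1
--         total = sizes[i]
--         while j < len(sections) and total + sizes[j] <= 10:
--             total += sizes[j]
--             j += 1
--         slides.append('# Glossary\n\n' + '\n\n'.join(sections[i:j]))
--         i = j
--     return slides if slides else ['# Glossary\n\nNo terms to display']
-- ===== Notes on version B (the rewrite author's own statement) =====
-- stated objective: alternative
-- what changed: A packs sections in one fold over the section list threading three accumulators (slides, current buffer, running length) and flushing the buffer; B precomputes all section line-counts, then uses a nested index scan (two-pointer style) to locate each slide's boundary j and slices sections[i:j] directly into a slide, never maintaining a partial-slide buffer.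
import Mathlib
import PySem

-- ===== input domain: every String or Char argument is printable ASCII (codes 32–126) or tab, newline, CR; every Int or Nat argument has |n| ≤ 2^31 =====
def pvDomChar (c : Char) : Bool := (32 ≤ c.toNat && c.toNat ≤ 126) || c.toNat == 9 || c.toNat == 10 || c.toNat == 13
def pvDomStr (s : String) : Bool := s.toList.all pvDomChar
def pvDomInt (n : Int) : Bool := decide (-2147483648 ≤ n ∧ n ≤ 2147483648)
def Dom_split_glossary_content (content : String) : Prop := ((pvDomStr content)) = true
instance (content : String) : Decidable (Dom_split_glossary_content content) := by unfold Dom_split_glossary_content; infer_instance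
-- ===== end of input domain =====

-- B replaces A's one-fold accumulator packing by: precompute section line-counts, then a nested
-- index scan locating each slide's boundary and slicing the group out (objective: alternative, same cost).

-- ===== PORT A =====
-- s.split(sep) with nonempty sep, done on char lists (exact)
def pvSplit (s sep : String) : List String :=
  (PySem.Chars.splitOn s.toList sep.toList).map String.ofList

-- "# Glossary\n\n" + "\n\n".join(cur)  (string concatenation done on the char lists, exact)
def pvRenderA (cur : List String) : String :=
  String.ofList ("# Glossary\n\n".toList ++ (PySem.Str.join "\n\n" cur).toList)

def split_glossary_content (content : String) : List String :=
  if content = "" ∨ content = "# Glossary\n\nNo technical terms found in the presentation." then [content]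
  else
    let letter_sections := PySem.List.slice (pvSplit content "\n\n**") (some 1) none
    let st := letter_sections.foldl (fun (st : List String × List String × Int) sec =>
        let sc := String.ofList ("**".toList ++ sec.toList)   -- f"**{section}", exact on char lists
        let lines : Int := ((pvSplit sc "\n").length : Int)
        if st.2.2 + lines > 10 ∨ st.2.1 = [] then
          ((if st.2.1 ≠ [] then st.1 ++ [pvRenderA st.2.1] else st.1), [sc], lines)
        else
          (st.1, st.2.1 ++ [sc], st.2.2 + lines)) ([], [], 0)
    let slides := if st.2.1 ≠ [] then st.1 ++ [pvRenderA st.2.1] else st.1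
    if slides = [] then ["# Glossary\n\nNo terms to display"] else slides

-- ===== PORT B =====
-- inner 'while j < len(sections) and total + sizes[j] <= 10: total += sizes[j]; j += 1' scan;
-- returns the final j (sizes.getD j 0 is sizes[j], always in range here)
def pvInner (sizes : List Int) (j : Nat) (total : Int) : Nat :=
  if _h : j < sizes.length then
    if total + sizes.getD j 0 ≤ 10 then pvInner sizes (j + 1) (total + sizes.getD j 0) else j
  else j
termination_by sizes.length - j

-- termination of the outer loop needs: the inner scan never moves j backwards
lemma pvInner_ge (sizes : List Int) (j : Nat) (total : Int) : j ≤ pvInner sizes j total := by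
  fun_induction pvInner with
  | case1 j total h hle ih => omega
  | case2 j total h hle => omega
  | case3 j total h => omega

-- outer 'while i < len(sections)' loop: j = inner scan's end, slice sections[i:j] into a slide
-- (sections[i:j] for 0 ≤ i < j is exactly (drop i).take (j - i))
def pvOuter (sections : List String) (sizes : List Int) (slides : List String) (i : Nat) : List String :=
  if _h : i < sections.length then
    pvOuter sections sizes
      (slides ++ [pvRenderA ((sections.drop i).take (pvInner sizes (i + 1) (sizes.getD i 0) - i))])
      (pvInner sizes (i + 1) (sizes.getD i 0))
  else slides
termination_by sections.length - i
decreasing_by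
  have := pvInner_ge sizes (i + 1) (sizes.getD i 0)
  omega

def split_glossary_content_alt (content : String) : List String :=
  if content = "" ∨ content = "# Glossary\n\nNo technical terms found in the presentation." then [content]
  else
    let sections := (PySem.List.slice (pvSplit content "\n\n**") (some 1) none).map
        (fun s => String.ofList ("**".toList ++ s.toList))       -- "**" + s, exact on char lists
    let sizes := sections.map (fun t => ((pvSplit t "\n").length : Int))
    let slides := pvOuter sections sizes [] 0
    if slides = [] then ["# Glossary\n\nNo terms to display"] else slides

-- ===== PRECONDITION & SPEC =====
def Spec_split_glossary_content (content : String) (out : List String) : Prop := out = split_glossary_content_alt content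
instance (content : String) (out : List String) : Decidable (Spec_split_glossary_content content out) := by unfold Spec_split_glossary_content; infer_instance

-- ===== CLAIM =====
def Claim_equal_split_glossary_content : Prop := ∀ (content : String), Dom_split_glossary_content content → Spec_split_glossary_content content (split_glossary_content content)

-- ===== LEMMAS AND PROOFS =====

-- common specification: greedy group length over (text, size) pairs, starting from running total t
def pvTg (t : Int) : List (String × Int) → Nat
  | [] => 0
  | q :: rest => if t + q.2 ≤ 10 then pvTg (t + q.2) rest + 1 else 0

lemma pvTg_le (t : Int) (Q : List (String × Int)) : pvTg t Q ≤ Q.length := by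
  induction Q generalizing t with
  | nil => simp [pvTg]
  | cons q rest ih =>
    simp only [pvTg]
    split
    · have := ih (t + q.2); simp; omega
    · simp

-- the greedy partition both programs compute, rendered group texts
def pvPack : List (String × Int) → List (List String)
  | [] => []
  | p :: rest =>
      (p.1 :: ((rest.take (pvTg p.2 rest)).map Prod.fst)) :: pvPack (rest.drop (pvTg p.2 rest))
termination_by Q => Q.length
decreasing_by simp

lemma pvPack_nil : pvPack [] = [] := by simp [pvPack]

lemma pvPack_cons (p : String × Int) (rest : List (String × Int)) :
    pvPack (p :: rest) = (p.1 :: ((rest.take (pvTg p.2 rest)).map Prod.fst)) :: pvPack (rest.drop (pvTg p.2 rest)) := by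
  simp [pvPack]

-- A's loop step, on a pre-sized (text, line-count) pair
def pvStepA (st : List String × List String × Int) (p : String × Int) : List String × List String × Int :=
  if st.2.2 + p.2 > 10 ∨ st.2.1 = [] then
    ((if st.2.1 ≠ [] then st.1 ++ [pvRenderA st.2.1] else st.1), [p.1], p.2)
  else
    (st.1, st.2.1 ++ [p.1], st.2.2 + p.2)

def pvFinal (st : List String × List String × Int) : List String :=
  if st.2.1 ≠ [] then st.1 ++ [pvRenderA st.2.1] else st.1

lemma pv_loopA (Q : List (String × Int)) :
    ∀ (slides cur : List String) (n : Int), cur ≠ [] →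
      pvFinal (Q.foldl pvStepA (slides, cur, n)) =
        slides ++ ((cur ++ (Q.take (pvTg n Q)).map Prod.fst) :: pvPack (Q.drop (pvTg n Q))).map pvRenderA := by
  induction Q with
  | nil => intro slides cur n hne; simp [pvFinal, pvTg, pvPack_nil, hne]
  | cons p rest ih =>
    intro slides cur n hne
    by_cases hle : n + p.2 ≤ 10
    · have hstep : pvStepA (slides, cur, n) p = (slides, cur ++ [p.1], n + p.2) := by
        simp only [pvStepA]; rw [if_neg (by simp [hne]; omega)]
      rw [List.foldl_cons, hstep, ih slides (cur ++ [p.1]) (n + p.2) (by simp)]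
      simp only [pvTg, if_pos hle]
      simp [List.take_succ_cons, List.drop_succ_cons]
    · have hstep : pvStepA (slides, cur, n) p = (slides ++ [pvRenderA cur], [p.1], p.2) := by
        simp only [pvStepA]; rw [if_pos (Or.inl (by omega)), if_pos hne]
      rw [List.foldl_cons, hstep, ih (slides ++ [pvRenderA cur]) [p.1] p.2 (by simp)]
      simp only [pvTg, if_neg hle]
      simp [pvPack_cons]

lemma pv_inner_eq (P : List (String × Int)) :
    ∀ (j : Nat) (t : Int), pvInner (P.map Prod.snd) j t = j + pvTg t (P.drop j) := by
  intro j
  induction hd : P.length - j generalizing j with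
  | zero =>
    intro t
    have hj : P.length ≤ j := by omega
    rw [pvInner, dif_neg (by simp; omega), List.drop_eq_nil_of_le hj]
    simp [pvTg]
  | succ d ihd =>
    intro t
    have hj : j < P.length := by omega
    have hdrop : P.drop j = P[j] :: P.drop (j + 1) := List.drop_eq_getElem_cons hj
    have hget : (P.map Prod.snd).getD j 0 = P[j].2 := by
      rw [List.getD_eq_getElem _ _ (by simpa using hj)]; simp
    rw [pvInner, dif_pos (by simpa using hj), hget, hdrop]
    simp only [pvTg]
    by_cases hle : t + P[j].2 ≤ 10
    · rw [if_pos hle, if_pos hle, ihd (j + 1) (by omega)]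
      omega
    · rw [if_neg hle, if_neg hle]
      omega

lemma pv_outer_eq (P : List (String × Int)) :
    ∀ (i : Nat) (slides : List String),
      pvOuter (P.map Prod.fst) (P.map Prod.snd) slides i = slides ++ (pvPack (P.drop i)).map pvRenderA := by
  intro i
  induction hd : P.length - i using Nat.strong_induction_on generalizing i with
  | _ d ihd =>
    intro slides
    by_cases hi : i < P.length
    · have hdrop : P.drop i = P[i] :: P.drop (i + 1) := List.drop_eq_getElem_cons hi
      have hget : (P.map Prod.snd).getD i 0 = P[i].2 := by
        rw [List.getD_eq_getElem _ _ (by simpa using hi)]; simp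
      set k := pvTg P[i].2 (P.drop (i + 1)) with hk
      have hkle : k ≤ P.length - (i + 1) := by
        have := pvTg_le P[i].2 (P.drop (i + 1)); simpa using this
      have hinner : pvInner (P.map Prod.snd) (i + 1) P[i].2 = (i + 1) + k :=
        pv_inner_eq P (i + 1) P[i].2
      have hslice : ((P.map Prod.fst).drop i).take ((i + 1) + k - i)
          = P[i].1 :: ((P.drop (i + 1)).take k).map Prod.fst := by
        have hdropF : List.drop i (P.map Prod.fst) = P[i].1 :: List.drop (i + 1) (P.map Prod.fst) := by
          rw [List.drop_eq_getElem_cons (l := P.map Prod.fst) (by simpa using hi)]; simp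
        rw [show (i + 1) + k - i = k + 1 from by omega, hdropF, List.take_succ_cons,
          List.map_take, List.map_drop]
      rw [pvOuter, dif_pos (by simpa using hi), hget, hinner, hslice]
      rw [ihd (P.length - ((i + 1) + k)) (by omega) ((i + 1) + k) rfl]
      have hdrop2 : P.drop ((i + 1) + k) = (P.drop (i + 1)).drop k := by
        rw [List.drop_drop]
      rw [hdrop, pvPack_cons, hdrop2]
      simp
      exact ⟨rfl, rfl⟩
    · rw [pvOuter, dif_neg (by simpa using hi), List.drop_eq_nil_of_le (by omega)]
      simp [pvPack_nil]

-- both programs compute the rendered greedy partition of the sized section list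
lemma pv_common (sections : List String) :
    pvFinal (sections.foldl (fun st t => pvStepA st (t, ((pvSplit t "\n").length : Int))) ([], [], 0)) =
    pvOuter sections (sections.map (fun t => ((pvSplit t "\n").length : Int))) [] 0 := by
  have hfold : sections.foldl (fun st t => pvStepA st (t, ((pvSplit t "\n").length : Int))) ([], [], 0)
      = (sections.map (fun t => (t, ((pvSplit t "\n").length : Int)))).foldl pvStepA ([], [], 0) := by
    rw [List.foldl_map]
  have hfst : (sections.map (fun t => (t, ((pvSplit t "\n").length : Int)))).map Prod.fst = sections := by
    simp [Function.comp_def]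
  have hsnd : (sections.map (fun t => (t, ((pvSplit t "\n").length : Int)))).map Prod.snd
      = sections.map (fun t => ((pvSplit t "\n").length : Int)) := by
    simp
  have hout := pv_outer_eq (sections.map (fun t => (t, ((pvSplit t "\n").length : Int)))) 0 []
  rw [hfst, hsnd] at hout
  rw [hfold, hout]
  cases hP : sections.map (fun t => (t, ((pvSplit t "\n").length : Int))) with
  | nil => simp [pvFinal, pvPack_nil]
  | cons p rest =>
    rw [List.foldl_cons]
    have hstep : pvStepA ([], [], 0) p = ([], [p.1], p.2) := by
      simp [pvStepA]
    rw [hstep, pv_loopA rest [] [p.1] p.2 (by simp)]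
    simp [pvPack_cons]

-- ===== VERDICT =====
theorem split_glossary_content_spec : Claim_equal_split_glossary_content := by
  intro content _
  unfold Spec_split_glossary_content
  by_cases h : content = "" ∨ content = "# Glossary\n\nNo technical terms found in the presentation."
  · simp [split_glossary_content, split_glossary_content_alt, h]
  · unfold split_glossary_content split_glossary_content_alt
    rw [if_neg h, if_neg h]
    have hc := pv_common ((PySem.List.slice (pvSplit content "\n\n**") (some 1) none).map
        (fun s => String.ofList ("**".toList ++ s.toList)))
    rw [List.foldl_map] at hc
    show (if pvFinal ((PySem.List.slice (pvSplit content "\n\n**") (some 1) none).foldl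
        (fun st s => pvStepA st ((fun s => String.ofList ("**".toList ++ s.toList)) s,
          ((pvSplit ((fun s => String.ofList ("**".toList ++ s.toList)) s) "\n").length : Int))) ([], [], 0)) = []
      then ["# Glossary\n\nNo terms to display"]
      else pvFinal ((PySem.List.slice (pvSplit content "\n\n**") (some 1) none).foldl
        (fun st s => pvStepA st ((fun s => String.ofList ("**".toList ++ s.toList)) s,
          ((pvSplit ((fun s => String.ofList ("**".toList ++ s.toList)) s) "\n").length : Int))) ([], [], 0)))
      = (if pvOuter ((PySem.List.slice (pvSplit content "\n\n**") (some 1) none).map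
            (fun s => String.ofList ("**".toList ++ s.toList)))
           (((PySem.List.slice (pvSplit content "\n\n**") (some 1) none).map
            (fun s => String.ofList ("**".toList ++ s.toList))).map
            (fun t => ((pvSplit t "\n").length : Int))) [] 0 = []
         then ["# Glossary\n\nNo terms to display"]
         else pvOuter ((PySem.List.slice (pvSplit content "\n\n**") (some 1) none).map
            (fun s => String.ofList ("**".toList ++ s.toList)))
           (((PySem.List.slice (pvSplit content "\n\n**") (some 1) none).map
            (fun s => String.ofList ("**".toList ++ s.toList))).map
            (fun t => ((pvSplit t "\n").length : Int))) [] 0)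
    rw [hc]
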